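-- pv_equiv track=rewrite | github.com/Marshal1101/DataStructure-Algorithm-Study | baekjoon/ImplementationQuestion2/002-17135-캐슬디펜스.py | enemy_move
-- ===== SOURCE A (Python) =====
-- def enemy_move(dead, board, N, M) -> bool:
--     for ei, ej in dead:
--         board[ei][ej] = 0
--
--     is_enemy = False
--     for i in range(N-1, -1, -1):
--         for j in range(M):
--             if board[i][j] != 0:
--                 board[i][j] = 0
--                 if i < N-1:
--                     board[i+1][j] = 1
--                     is_enemy = True
--
--     return is_enemy
-- ===== SOURCE B (Python) =====
-- def enemy_move(dead, board, N, M) -> bool: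
--     for ei, ej in dead:
--         board[ei][ej] = 0
--
--     shifted = [[0] * M] + [[1 if board[i][j] != 0 else 0 for j in range(M)]
--                            for i in range(N - 1)]
--     is_enemy = any(any(row) for row in shifted)
--
--     for i in range(N):
--         for j in range(M):
--             board[i][j] = shifted[i][j]
--
--     return is_enemy
-- ===== Notes on version B (the rewrite author's own statement) =====
-- stated objective: alternative
-- what changed: B replaces A's bottom-up in-place zero-and-shift sweep with a declarative build: it constructs the shifted grid as a comprehension over the unmutated board, gets the flag with any(), and copies the new grid back cell by cell.
import Mathlib
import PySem

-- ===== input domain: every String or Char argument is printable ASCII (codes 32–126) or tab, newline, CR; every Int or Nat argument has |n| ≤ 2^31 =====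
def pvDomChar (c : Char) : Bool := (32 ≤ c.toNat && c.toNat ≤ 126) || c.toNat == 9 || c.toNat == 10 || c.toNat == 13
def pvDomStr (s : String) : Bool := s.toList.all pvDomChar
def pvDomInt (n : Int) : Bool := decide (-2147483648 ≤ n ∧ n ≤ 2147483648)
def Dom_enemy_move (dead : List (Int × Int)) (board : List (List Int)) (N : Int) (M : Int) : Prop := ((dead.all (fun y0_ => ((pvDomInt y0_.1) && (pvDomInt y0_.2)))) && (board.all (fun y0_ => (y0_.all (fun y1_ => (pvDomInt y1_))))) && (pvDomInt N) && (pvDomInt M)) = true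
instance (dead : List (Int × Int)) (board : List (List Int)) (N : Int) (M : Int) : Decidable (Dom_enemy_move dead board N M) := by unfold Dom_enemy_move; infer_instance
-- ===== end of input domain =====

-- B builds a fresh shifted grid in one top-down scan of the unmutated board (then copies it back
-- cell by cell), instead of A's bottom-up in-place zero-and-shift sweep; equal cost, different
-- decomposition. Both Pythons mutate `board` in place identically; the equivalence proved here is
-- about the RETURN value (B's final copy-back loop only mutates `board`, so it is omitted in the port).

-- ===== PORT A =====
-- shared low-level cell primitives, Python-exact: `b[i][j]` read (default only used out of range,
-- which Pre_ excludes) and the in-place row mutation `b[i][j] = v` (none = IndexError = no-op here,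
-- unreachable under Pre_)
def getCell (b : List (List Int)) (i j : Int) : Int :=
  PySem.List.pyGetD (PySem.List.pyGetD b i []) j 0

def setCell (b : List (List Int)) (i j : Int) (v : Int) : List (List Int) :=
  match PySem.List.pyGet? b i with
  | none => b
  | some row =>
    match PySem.List.pySet? row j v with
    | none => b
    | some row' => PySem.List.pySetD b i row'

-- body of A's inner `for j in range(M)` loop
def innerA (N i : Int) (st : List (List Int) × Bool) (j : Int) : List (List Int) × Bool :=
  if getCell st.1 i j ≠ 0 then
    let b1 := setCell st.1 i j 0
    if i < N - 1 then (setCell b1 (i + 1) j 1, true) else (b1, st.2)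
  else st

-- body of A's outer `for i in range(N-1, -1, -1)` loop
def outerA (N M : Int) (st : List (List Int) × Bool) (i : Int) : List (List Int) × Bool :=
  (PySem.List.pyRange 0 M 1).foldl (innerA N i) st

def enemy_move (dead : List (Int × Int)) (board : List (List Int)) (N : Int) (M : Int) : Bool :=
  let b0 := dead.foldl (fun b p => setCell b p.1 p.2 0) board
  ((PySem.List.pyRange (N - 1) (-1) (-1)).foldl (outerA N M) (b0, false)).2

-- ===== PORT B =====
def enemy_move_alt (dead : List (Int × Int)) (board : List (List Int)) (N : Int) (M : Int) : Bool :=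
  let b0 := dead.foldl (fun b p => setCell b p.1 p.2 0) board
  let shifted := [List.replicate M.toNat 0] ++
    (PySem.List.pyRange 0 (N - 1) 1).map (fun i =>
      (PySem.List.pyRange 0 M 1).map (fun j => if getCell b0 i j ≠ 0 then (1 : Int) else 0))
  -- `is_enemy = any(any(row) for row in shifted)`; the final copy-back loop mutates `board`
  -- only and never affects the return value — omitted
  shifted.any (fun row => row.any (fun c => decide (c ≠ 0)))

-- ===== PRECONDITION & SPEC =====
-- Pre_ excludes exactly the inputs on which Python A raises IndexError: a dead coordinate out of
-- range, or (when the scan actually touches cells, N > 0 and M > 0) fewer than N rows or a scanned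
-- row shorter than M.
def Pre_enemy_move (dead : List (Int × Int)) (board : List (List Int)) (N : Int) (M : Int) : Prop :=
  (0 < N ∧ 0 < M → N ≤ board.length ∧ ∀ row ∈ board.take N.toNat, M ≤ row.length)
  ∧ ∀ p ∈ dead, ((PySem.List.pyGet? board p.1).bind (fun row => PySem.List.pyGet? row p.2)).isSome = true
instance (dead : List (Int × Int)) (board : List (List Int)) (N : Int) (M : Int) : Decidable (Pre_enemy_move dead board N M) := by unfold Pre_enemy_move; infer_instance

def pvWitness_enemy_move : (List (Int × Int)) × List (List Int) × Int × Int :=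
  ([(0, 0)], [[1, 0], [0, 1]], 2, 2)

def Spec_enemy_move (dead : List (Int × Int)) (board : List (List Int)) (N : Int) (M : Int) (out : Bool) : Prop := out = enemy_move_alt dead board N M
instance (dead : List (Int × Int)) (board : List (List Int)) (N : Int) (M : Int) (out : Bool) : Decidable (Spec_enemy_move dead board N M out) := by unfold Spec_enemy_move; infer_instance

-- ===== CLAIM (what is proved, stated in full; the proofs are below) =====
def Claim_equal_enemy_move : Prop := ∀ (dead : List (Int × Int)) (board : List (List Int)) (N : Int) (M : Int), Dom_enemy_move dead board N M → Pre_enemy_move dead board N M → Spec_enemy_move dead board N M (enemy_move dead board N M)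

-- ===== LEMMAS AND PROOFS =====

-- `b.all (row i = row i)` for the one Bool each loop computes at row i (reads of row i only)
def rowAnyB (b : List (List Int)) (i M : Int) : Bool :=
  (PySem.List.pyRange 0 M 1).any (fun j => decide (getCell b i j ≠ 0))

theorem any_congr_mem {α : Type} {l : List α} {f g : α → Bool}
    (h : ∀ x ∈ l, f x = g x) : l.any f = l.any g := by
  induction l with
  | nil => rfl
  | cons a t ih =>
    simp only [List.any_cons, h a (by simp), ih (fun x hx => h x (by simp [hx]))]

-- writing row i' never changes reads in a different (nonneg) row i
theorem getCell_setCell_ne_row (b : List (List Int)) (i' j' v i j : Int)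
    (hi' : 0 ≤ i') (hi : 0 ≤ i) (hne : i ≠ i') :
    getCell (setCell b i' j' v) i j = getCell b i j := by
  unfold setCell
  split
  · rfl
  split
  · rfl
  unfold getCell
  rw [PySem.List.pySetD_of_nonneg _ _ hi']
  congr 1
  rw [PySem.List.pyGetD_of_nonneg _ _ hi, PySem.List.pyGetD_of_nonneg _ _ hi]
  unfold List.getD
  rw [List.getElem?_set_ne (by omega)]

-- ===== A side =====
-- A's inner loop: the flag it returns, and that it leaves rows below i untouched
theorem foldA_inner (N i : Int) (hi : 0 ≤ i) (L : List Int) :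
    ∀ st : List (List Int) × Bool,
      (L.foldl (innerA N i) st).2
        = (st.2 || (decide (i < N - 1) && L.any (fun j => decide (getCell st.1 i j ≠ 0))))
      ∧ ∀ r c : Int, 0 ≤ r → r < i →
          getCell (L.foldl (innerA N i) st).1 r c = getCell st.1 r c := by
  induction L with
  | nil => intro st; simp
  | cons j L ih =>
    intro st
    simp only [List.foldl_cons, List.any_cons]
    by_cases hc : getCell st.1 i j ≠ 0
    · by_cases hd : i < N - 1
      · have hst' : innerA N i st j = (setCell (setCell st.1 i j 0) (i + 1) j 1, true) := by
          simp [innerA, hc, hd]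
        rw [hst']
        refine ⟨?_, ?_⟩
        · rw [(ih _).1]; simp [hc, hd]
        · intro r c hr hri
          rw [(ih _).2 r c hr hri]
          simp only
          rw [getCell_setCell_ne_row _ _ _ _ _ _ (by omega) hr (by omega),
              getCell_setCell_ne_row _ _ _ _ _ _ hi hr (by omega)]
      · have hst' : innerA N i st j = (setCell st.1 i j 0, st.2) := by
          simp [innerA, hc, hd]
        rw [hst']
        refine ⟨?_, ?_⟩
        · rw [(ih _).1]; simp [hd]
        · intro r c hr hri
          rw [(ih _).2 r c hr hri]
          simp only
          rw [getCell_setCell_ne_row _ _ _ _ _ _ hi hr (by omega)]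
    · have hst' : innerA N i st j = st := by simp [innerA, hc]
      rw [hst']
      refine ⟨?_, (ih st).2⟩
      rw [(ih st).1]
      simp [hc]

-- A's countdown outer loop, characterised over k = number of rows still to process
theorem foldA_outer (N M : Int) : ∀ (k : Nat) (st : List (List Int) × Bool),
    ((PySem.List.pyRange ((k : Int) - 1) (-1) (-1)).foldl (outerA N M) st).2
      = (st.2 || (PySem.List.pyRange 0 (k : Int) 1).any
            (fun i => decide (i < N - 1) && rowAnyB st.1 i M)) := by
  intro k
  induction k with
  | zero =>
    intro st
    rw [PySem.List.pyRange_neg_one_eq_nil (by omega), PySem.List.pyRange_one_eq_nil (by omega)]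
    simp
  | succ k ih =>
    intro st
    have hcons : PySem.List.pyRange (((k : Nat) + 1 : Int) - 1) (-1) (-1)
        = ((k : Int)) :: PySem.List.pyRange ((k : Int) - 1) (-1) (-1) := by
      rw [show ((k : Int) + 1 - 1) = (k : Int) by ring]
      exact PySem.List.pyRange_neg_one_cons (by omega)
    simp only [Nat.cast_add, Nat.cast_one]
    rw [hcons, List.foldl_cons, ih]
    have hinner := foldA_inner N (k : Int) (by omega) (PySem.List.pyRange 0 M 1) st
    have hflag : (outerA N M st (k : Int)).2
        = (st.2 || (decide ((k : Int) < N - 1) && rowAnyB st.1 (k : Int) M)) := by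
      unfold outerA rowAnyB; exact hinner.1
    have hrow : ∀ i ∈ PySem.List.pyRange 0 (k : Int) 1,
        (decide (i < N - 1) && rowAnyB (outerA N M st (k : Int)).1 i M)
          = (decide (i < N - 1) && rowAnyB st.1 i M) := by
      intro i hmem
      have hb := (PySem.List.mem_pyRange_one).1 hmem
      unfold rowAnyB
      congr 1
      refine any_congr_mem (fun j hj => ?_)
      have := hinner.2 i j hb.1 hb.2
      unfold outerA
      rw [this]
    rw [any_congr_mem hrow, hflag]
    have hsplit : PySem.List.pyRange 0 ((k : Int) + 1) 1
        = PySem.List.pyRange 0 (k : Int) 1 ++ [(k : Int)] := by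
      exact PySem.List.pyRange_one_succ_right (by omega)
    rw [hsplit, List.any_append]
    simp only [List.any_cons, List.any_nil, Bool.or_false]
    cases st.2 <;> cases hdk : decide ((k : Int) < N - 1) && rowAnyB st.1 (k : Int) M <;>
      simp [Bool.or_comm]

-- ===== B side =====
theorem any_replicate_zero (n : Nat) :
    (List.replicate n (0 : Int)).any (fun c => decide (c ≠ 0)) = false := by
  induction n with
  | zero => rfl
  | succ n _ => simp [List.replicate]

theorem any_row (b0 : List (List Int)) (i M : Int) :
    ((PySem.List.pyRange 0 M 1).map
        (fun j => if getCell b0 i j ≠ 0 then (1 : Int) else 0)).any (fun c => decide (c ≠ 0))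
      = rowAnyB b0 i M := by
  unfold rowAnyB
  rw [List.any_map]
  refine any_congr_mem (fun j _ => ?_)
  by_cases h : getCell b0 i j ≠ 0 <;> simp [h]

-- guarded any over 0..N-1 equals plain any over 0..N-2
theorem any_guard (N : Int) (hN : 0 < N) (p : Int → Bool) :
    (PySem.List.pyRange 0 N 1).any (fun i => decide (i < N - 1) && p i)
      = (PySem.List.pyRange 0 (N - 1) 1).any p := by
  have hsplit : PySem.List.pyRange 0 N 1
      = PySem.List.pyRange 0 (N - 1) 1 ++ [N - 1] := by
    have := PySem.List.pyRange_one_succ_right (a := 0) (b := N - 1) (by omega)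
    rw [show N - 1 + 1 = N by ring] at this
    exact this
  rw [hsplit, List.any_append]
  simp only [List.any_cons, List.any_nil, Bool.or_false]
  have h1 : (decide (N - 1 < N - 1) && p (N - 1)) = false := by simp
  rw [h1, Bool.or_false]
  refine any_congr_mem (fun i hi => ?_)
  have hb := (PySem.List.mem_pyRange_one).1 hi
  simp [hb.2]

-- ===== VERDICT (by name: the statement is the Claim_ definition above) =====
theorem enemy_move_spec : Claim_equal_enemy_move := by
  intro dead board N M _hDom _hPre
  unfold Spec_enemy_move enemy_move enemy_move_alt
  simp only
  set b0 := dead.foldl (fun b p => setCell b p.1 p.2 0) board with hb0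
  rw [List.any_append, List.any_cons, List.any_nil, any_replicate_zero, List.any_map]
  simp only [Function.comp_def]
  rw [any_congr_mem (fun i _ => any_row b0 i M)]
  simp only [Bool.false_or, Bool.or_false]
  by_cases hN : 0 < N
  · have hA := foldA_outer N M N.toNat (b0, false)
    rw [show ((N.toNat : Int)) = N by omega] at hA
    rw [hA]
    simp only [Bool.false_or]
    exact any_guard N hN _
  · have h1 : PySem.List.pyRange (N - 1) (-1) (-1) = ([] : List Int) :=
      PySem.List.pyRange_neg_one_eq_nil (by omega)
    have h2 : PySem.List.pyRange 0 (N - 1) 1 = ([] : List Int) :=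
      PySem.List.pyRange_one_eq_nil (by omega)
    rw [h1, h2]
    simp
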